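-- pv_equiv track=rewrite | github.com/zoshs2/CodingTest | 1758.py | MaximumTip
-- ===== SOURCE A (Python) =====
-- def MaximumTip(tip_list):
--     tip_list = sorted(tip_list, reverse=True) # Key-point
--     maxtip = 0
--     for i, tip in enumerate(tip_list):
--         newtip = (tip - i)
--         if newtip > 0:
--             maxtip += newtip
--
--     return maxtip
-- ===== SOURCE B (Python) =====
-- def MaximumTip(tip_list):
--     ts = sorted(tip_list, reverse=True)
--     k = 0
--     while k < len(ts) and ts[k] > k:
--         k += 1
--     return sum(ts[:k]) - k * (k - 1) // 2
-- ===== Notes on version B (the rewrite author's own statement) =====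
-- stated objective: alternative
-- what changed: Instead of A's termwise conditional accumulation of tip-i over the whole sorted list, B finds the cutoff k (the positive terms form a prefix since tip_i - i is strictly decreasing) and returns the prefix sum minus the closed-form triangular correction k*(k-1)//2.
import Mathlib
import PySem

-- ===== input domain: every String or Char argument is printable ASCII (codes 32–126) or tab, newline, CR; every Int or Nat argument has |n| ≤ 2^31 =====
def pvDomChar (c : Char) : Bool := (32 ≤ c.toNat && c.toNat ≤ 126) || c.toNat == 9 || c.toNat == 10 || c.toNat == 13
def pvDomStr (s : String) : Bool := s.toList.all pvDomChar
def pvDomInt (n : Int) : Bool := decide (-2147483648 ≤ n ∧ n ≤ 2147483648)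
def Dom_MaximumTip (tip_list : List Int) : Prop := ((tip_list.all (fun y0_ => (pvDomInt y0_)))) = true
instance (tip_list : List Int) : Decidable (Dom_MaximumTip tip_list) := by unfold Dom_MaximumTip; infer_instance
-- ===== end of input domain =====

-- B replaces A's termwise conditional accumulation by finding the cutoff prefix and a
-- closed-form triangular rank correction; objective: alternative decomposition.

-- ===== PORT A =====
def MaximumTip (tip_list : List Int) : Int :=
  let ts := PySem.List.sorted tip_list (fun x => x) true
  (PySem.List.enumerate ts 0).foldl
    (fun maxtip p =>
      let newtip := p.2 - p.1
      if newtip > 0 then maxtip + newtip else maxtip) 0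

-- ===== PORT B =====
-- the 'while k < len(ts) and ts[k] > k' loop of Source B
def pvFindK : List Int → Nat → Nat
  | [], k => k
  | t :: rest, k => if (k : Int) < t then pvFindK rest (k + 1) else k

def MaximumTip_alt (tip_list : List Int) : Int :=
  let ts := PySem.List.sorted tip_list (fun x => x) true
  let k := pvFindK ts 0
  (ts.take k).sum - PySem.Int.floordiv ((k : Int) * ((k : Int) - 1)) 2

-- ===== PRECONDITION & SPEC =====
def Spec_MaximumTip (tip_list : List Int) (out : Int) : Prop := out = MaximumTip_alt tip_list
instance (tip_list : List Int) (out : Int) : Decidable (Spec_MaximumTip tip_list out) := by unfold Spec_MaximumTip; infer_instance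

-- ===== CLAIM (what is proved, stated in full; the proofs are below) =====
def Claim_equal_MaximumTip : Prop := ∀ (tip_list : List Int), Dom_MaximumTip tip_list → Spec_MaximumTip tip_list (MaximumTip tip_list)

-- ===== LEMMAS AND PROOFS =====

-- A's loop as a structural recursion over the list with an explicit Int index.
def fA : List Int → Int → Int → Int
  | [], _, acc => acc
  | t :: r, i, acc => fA r (i + 1) (if t - i > 0 then acc + (t - i) else acc)

lemma foldl_enum_eq_fA (l : List Int) (i acc : Int) :
    (PySem.List.enumerate l i).foldl
      (fun maxtip p =>
        let newtip := p.2 - p.1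
        if newtip > 0 then maxtip + newtip else maxtip) acc = fA l i acc := by
  induction l generalizing i acc with
  | nil => simp [PySem.List.enumerate_nil, fA]
  | cons t r ih =>
    rw [PySem.List.enumerate_cons, List.foldl_cons, ih]
    rfl

-- the positive-prefix sum, recursively
def gB : List Int → Int → Int
  | [], _ => 0
  | t :: r, i => if i < t then (t - i) + gB r (i + 1) else 0

lemma gB_zero (l : List Int) (i : Int) (h : ∀ x ∈ l, x ≤ i) : gB l i = 0 := by
  induction l generalizing i with
  | nil => rfl
  | cons t r ih =>
    have ht : t ≤ i := h t (by simp)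
    simp only [gB, if_neg (not_lt.mpr ht)]

lemma fA_eq_gB (l : List Int) (i acc : Int)
    (hs : l.Pairwise (fun a b => b ≤ a)) : fA l i acc = acc + gB l i := by
  induction l generalizing i acc with
  | nil => simp [fA, gB]
  | cons t r ih =>
    rcases List.pairwise_cons.mp hs with ⟨hle, hs'⟩
    by_cases h : i < t
    · have : t - i > 0 := by omega
      simp only [fA, gB, if_pos this, if_pos h, ih _ _ hs']
      ring
    · have h0 : ¬ t - i > 0 := by omega
      have hz : gB r (i + 1) = 0 :=
        gB_zero r (i + 1) (fun x hx => by have := hle x hx; omega)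
      simp only [fA, gB, if_neg h0, if_neg h, ih _ _ hs', hz, add_zero]

-- number of loop steps taken by Source B's while loop
def cnt : List Int → Nat → Nat
  | [], _ => 0
  | t :: r, k => if (k : Int) < t then cnt r (k + 1) + 1 else 0

lemma pvFindK_eq_cnt (l : List Int) (k : Nat) : pvFindK l k = k + cnt l k := by
  induction l generalizing k with
  | nil => simp [pvFindK, cnt]
  | cons t r ih =>
    by_cases h : (k : Int) < t
    · simp only [pvFindK, cnt, if_pos h, ih]; omega
    · simp [pvFindK, cnt, if_neg h]

lemma twice_gB (l : List Int) (k : Nat) :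
    2 * gB l (k : Int) =
      2 * (l.take (cnt l k)).sum - 2 * (cnt l k : Int) * (k : Int)
        - (cnt l k : Int) * ((cnt l k : Int) - 1) := by
  induction l generalizing k with
  | nil => simp [gB, cnt]
  | cons t r ih =>
    by_cases h : (k : Int) < t
    · have ihk := ih (k + 1)
      simp only [gB, cnt, if_pos h, List.take_succ_cons, List.sum_cons]
      push_cast at ihk ⊢
      linear_combination ihk
    · simp [gB, cnt, if_neg h]

-- ===== VERDICT (by name: the statement is the Claim_ definition above) =====
theorem MaximumTip_spec : Claim_equal_MaximumTip := by
  intro tip_list _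
  unfold Spec_MaximumTip MaximumTip MaximumTip_alt
  simp only []
  set ts := PySem.List.sorted tip_list (fun x => x) true with hts
  have hsorted : ts.Pairwise (fun a b => b ≤ a) := by
    simpa using PySem.List.sorted_pairwise_rev tip_list (fun x => x)
  rw [foldl_enum_eq_fA, fA_eq_gB ts 0 0 hsorted, zero_add]
  have hk : pvFindK ts 0 = cnt ts 0 := by rw [pvFindK_eq_cnt]; omega
  rw [hk]
  set n := cnt ts 0 with hn
  have h2 : 2 * gB ts 0 =
      2 * (ts.take n).sum - 2 * (n : Int) * (0 : Int) - (n : Int) * ((n : Int) - 1) := by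
    have := twice_gB ts 0
    simpa using this
  have heven : Even ((n : Int) * ((n : Int) - 1)) := by
    have h0 := Int.even_mul_succ_self ((n : Int) - 1)
    have : ((n : Int) - 1) * ((n : Int) - 1 + 1) = (n : Int) * ((n : Int) - 1) := by ring
    rwa [this] at h0
  obtain ⟨m, hm⟩ := heven
  rw [PySem.Int.floordiv_eq_ediv_of_pos (by norm_num), hm]
  rw [hm] at h2
  omega
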